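-- pv_equiv track=rewrite | github.com/dundunmao/mian_jing | WISH/red_green.py | red_green
-- ===== SOURCE A (Python) =====
-- def red_green(a):
--
--     max_diff = 0
--     min_diff_from_begin = 0
--     start = -1
--     end = 0
--     count_zero = 0
--     count_one = 0
--     res = [start, end]
--     for i in range(len(a)):
--         if a[i] == 0:
--             count_zero += 1
--         else:
--             count_one += 1
--         diff_from_begin = count_one - count_zero
--         if diff_from_begin - min_diff_from_begin > max_diff:
--             max_diff = diff_from_begin - min_diff_from_begin
--             res = [start + 1, i]
--         if diff_from_begin < min_diff_from_begin:
--             start = i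
--             min_diff_from_begin = diff_from_begin
--     return res
-- ===== SOURCE B (Python) =====
-- def red_green(a):
--     best_diff = 0
--     res = [-1, 0]
--     for r in range(len(a)):
--         for l in range(r + 1):
--             s = sum(1 if x != 0 else -1 for x in a[l:r + 1])
--             if s > best_diff:
--                 best_diff = s
--                 res = [l, r]
--     return res
-- ===== Notes on version B (the rewrite author's own statement) =====
-- stated objective: simpler
-- what changed: Replaced the single-pass Kadane-style scan (running prefix difference with tracked minimum and start index) by a plain brute-force double loop that scores every subarray directly and keeps the strictly best one, reproducing the same default result and tie-break (smallest end index, then smallest start index).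
import Mathlib
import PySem

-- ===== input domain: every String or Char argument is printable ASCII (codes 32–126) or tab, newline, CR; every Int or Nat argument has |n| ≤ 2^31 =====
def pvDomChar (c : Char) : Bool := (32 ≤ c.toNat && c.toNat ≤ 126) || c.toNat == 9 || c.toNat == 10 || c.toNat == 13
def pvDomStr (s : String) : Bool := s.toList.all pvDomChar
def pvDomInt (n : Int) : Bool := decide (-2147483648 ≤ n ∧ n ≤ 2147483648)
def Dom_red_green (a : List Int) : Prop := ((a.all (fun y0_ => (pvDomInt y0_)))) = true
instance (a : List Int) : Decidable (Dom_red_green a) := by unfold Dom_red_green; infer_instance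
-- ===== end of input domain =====

-- B replaces A's one-pass Kadane scan with a plain brute-force double loop over all
-- subarrays (objective: simpler/clearer; B is slower, no speed is claimed).

-- ===== PORT A =====
-- state: (max_diff, min_diff_from_begin, start, count_zero, count_one, res);
-- a.getD i 0 is exact for Python's a[i] here since i ∈ range(len(a)).
def redGreenStepA (a : List Int) (st : Int × Int × Int × Int × Int × List Int) (i : ℕ) :
    Int × Int × Int × Int × Int × List Int :=
  match st with
  | (max_diff, min_diff, start, count_zero, count_one, res) =>
    let count_zero' := if a.getD i 0 = 0 then count_zero + 1 else count_zero
    let count_one'  := if a.getD i 0 = 0 then count_one else count_one + 1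
    let diff := count_one' - count_zero'
    let max_diff' := if max_diff < diff - min_diff then diff - min_diff else max_diff
    let res' := if max_diff < diff - min_diff then [start + 1, (i : Int)] else res
    let start' := if diff < min_diff then (i : Int) else start
    let min_diff' := if diff < min_diff then diff else min_diff
    (max_diff', min_diff', start', count_zero', count_one', res')

def red_green (a : List Int) : List Int :=
  ((List.range a.length).foldl (redGreenStepA a) (0, 0, -1, 0, 0, [-1, 0])).2.2.2.2.2

-- ===== PORT B =====
-- sum(1 if x != 0 else -1 for x in a[l:r+1])
def redGreenVal (a : List Int) (l r : ℕ) : Int :=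
  ((PySem.List.slice a (some (l : Int)) (some ((r : Int) + 1))).map
    (fun x => if x ≠ 0 then (1 : Int) else -1)).sum

-- inner loop body: state (best_diff, res)
def redGreenStepB (a : List Int) (r : ℕ) (st : Int × List Int) (l : ℕ) : Int × List Int :=
  let s := redGreenVal a l r
  if st.1 < s then (s, [(l : Int), (r : Int)]) else st

def red_green_alt (a : List Int) : List Int :=
  ((List.range a.length).foldl
    (fun st r => (List.range (r + 1)).foldl (redGreenStepB a r) st)
    ((0 : Int), [(-1 : Int), 0])).2

-- ===== PRECONDITION & SPEC =====
def Spec_red_green (a : List Int) (out : List Int) : Prop := out = red_green_alt a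
instance (a : List Int) (out : List Int) : Decidable (Spec_red_green a out) := by unfold Spec_red_green; infer_instance

-- ===== CLAIM (what is proved, stated in full; the proofs are below) =====
def Claim_equal_red_green : Prop := ∀ (a : List Int), Dom_red_green a → Spec_red_green a (red_green a)

-- ===== LEMMAS AND PROOFS =====

-- element value +1/-1
def pvF (x : Int) : Int := if x = 0 then -1 else 1

-- prefix sum of pvF over the first k elements
def pvPre (a : List Int) (k : ℕ) : Int := ((a.take k).map pvF).sum

-- number of zeros among the first k elements, as an Int
def pvCZ (a : List Int) (k : ℕ) : Int := ((a.take k).countP (fun x => decide (x = 0)) : ℕ)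

-- minimum of pvPre a over 0..m-1 (0 for m = 0; note pvPre a 0 = 0)
def pvMinU (a : List Int) : ℕ → Int
  | 0 => 0
  | m + 1 => min (pvMinU a m) (pvPre a m)

-- first index attaining that minimum
def pvArgU (a : List Int) : ℕ → ℕ
  | 0 => 0
  | m + 1 => if pvPre a m < pvMinU a m then m else pvArgU a m

-- best subarray value ending at index k
def pvC (a : List Int) (k : ℕ) : Int := pvPre a (k + 1) - pvMinU a (k + 1)

-- (best_diff, res) after the first k outer iterations
def pvBest (a : List Int) : ℕ → Int × List Int
  | 0 => (0, [-1, 0])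
  | k + 1 =>
    let p := pvBest a k
    if p.1 < pvC a k then (pvC a k, [(pvArgU a (k + 1) : Int), (k : Int)]) else p

lemma pvGetD (a : List Int) (k : ℕ) (hk : k < a.length) : a.getD k 0 = a[k] := by
  simp [List.getD_eq_getElem?_getD, List.getElem?_eq_getElem hk]

lemma pvCZ_succ (a : List Int) (k : ℕ) (hk : k < a.length) :
    pvCZ a (k + 1) = pvCZ a k + (if a[k] = 0 then 1 else 0) := by
  unfold pvCZ
  rw [List.take_add_one, List.getElem?_eq_getElem hk]
  by_cases h : a[k] = 0 <;>
    simp only [Option.toList_some, List.countP_append, List.countP_cons, List.countP_nil, h] <;>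
    simp

lemma pvPre_succ (a : List Int) (k : ℕ) (hk : k < a.length) :
    pvPre a (k + 1) = pvPre a k + pvF a[k] := by
  unfold pvPre
  rw [List.take_add_one, List.getElem?_eq_getElem hk, Option.toList_some, List.map_append,
    List.sum_append]
  simp

lemma pvPre_eq (a : List Int) (k : ℕ) (hk : k ≤ a.length) :
    pvPre a k = (k : Int) - 2 * pvCZ a k := by
  induction k with
  | zero => simp [pvPre, pvCZ]
  | succ k ih =>
    have hk' : k < a.length := hk
    rw [pvPre_succ a k hk', pvCZ_succ a k hk', ih (le_of_lt hk')]
    unfold pvF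
    by_cases h : a[k] = 0 <;> simp [h] <;> push_cast <;> ring

lemma pvPre_add (a : List Int) (l m : ℕ) :
    pvPre a (l + m) = pvPre a l + (((a.drop l).take m).map pvF).sum := by
  unfold pvPre
  rw [List.take_add, List.map_append, List.sum_append]

lemma pvVal_eq (a : List Int) (l r : ℕ) (hl : l ≤ r) :
    redGreenVal a l r = pvPre a (r + 1) - pvPre a l := by
  have hg : (fun x : Int => if x ≠ 0 then (1 : Int) else -1) = pvF := by
    funext x; unfold pvF; by_cases h : x = 0 <;> simp [h]
  have harg : ((r : Int) + 1) = ((r + 1 : ℕ) : Int) := by omega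
  unfold redGreenVal
  rw [harg, PySem.List.slice_natCast, hg]
  have h := pvPre_add a l (r + 1 - l)
  rw [show l + (r + 1 - l) = r + 1 by omega] at h
  rw [h]; ring

-- net effect of the inner loop of B (first m iterations)
lemma pvInner (a : List Int) (r : ℕ) (best : Int) (res : List Int)
    (m : ℕ) (hm : 1 ≤ m) (hm' : m ≤ r + 1) :
    (List.range m).foldl (redGreenStepB a r) (best, res) =
      if best < pvPre a (r + 1) - pvMinU a m
      then (pvPre a (r + 1) - pvMinU a m, [(pvArgU a m : Int), (r : Int)])
      else (best, res) := by
  induction m with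
  | zero => exact absurd hm (by omega)
  | succ m ih =>
    rw [List.range_succ, List.foldl_append, List.foldl_cons, List.foldl_nil]
    by_cases hm0 : m = 0
    · subst hm0
      have hv := pvVal_eq a 0 r (Nat.zero_le r)
      have h0 : pvPre a 0 = 0 := by simp [pvPre]
      simp only [List.range_zero, List.foldl_nil, redGreenStepB, hv, h0, pvMinU, pvArgU]
      simp
    · have hrec := ih (by omega) (by omega)
      rw [hrec]
      have hv := pvVal_eq a m r (by omega)
      simp only [redGreenStepB, hv, pvMinU, pvArgU]
      split_ifs <;> simp_all <;> omega

-- characterization of A's loop state after k iterations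
lemma pvAState (a : List Int) (k : ℕ) (hk : k ≤ a.length) :
    (List.range k).foldl (redGreenStepA a) (0, 0, -1, 0, 0, [-1, 0]) =
      ((pvBest a k).1, pvMinU a (k + 1), (pvArgU a (k + 1) : Int) - 1,
        pvCZ a k, (k : Int) - pvCZ a k, (pvBest a k).2) := by
  induction k with
  | zero => simp [pvBest, pvMinU, pvArgU, pvCZ, pvPre]
  | succ k ih =>
    have hk' : k < a.length := hk
    rw [List.range_succ, List.foldl_append, List.foldl_cons, List.foldl_nil, ih (le_of_lt hk')]
    have hget := pvGetD a k hk'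
    have hcz := pvCZ_succ a k hk'
    have hP1 := pvPre_eq a (k + 1) hk
    have hP0 := pvPre_eq a k (le_of_lt hk')
    have hB : pvBest a (k + 1) =
        if (pvBest a k).1 < pvPre a (k + 1) - pvMinU a (k + 1)
        then (pvPre a (k + 1) - pvMinU a (k + 1), [((pvArgU a (k + 1) : ℕ) : Int), (k : Int)])
        else pvBest a k := rfl
    have hM2 : pvMinU a (k + 1 + 1) = min (pvMinU a (k + 1)) (pvPre a (k + 1)) := rfl
    have hA2 : pvArgU a (k + 1 + 1) =
        if pvPre a (k + 1) < pvMinU a (k + 1) then k + 1 else pvArgU a (k + 1) := rfl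
    by_cases hz : a[k] = 0
    · have hczv : pvCZ a (k + 1) = pvCZ a k + 1 := by rw [hcz]; simp [hz]
      have hdiff : (k : Int) - pvCZ a k - (pvCZ a k + 1) = pvPre a (k + 1) := by
        rw [hP1, hczv]; push_cast; ring
      simp only [redGreenStepA, hget, hz, reduceIte, hdiff, hB, hM2, hA2]
      by_cases hc : (pvBest a k).1 < pvPre a (k + 1) - pvMinU a (k + 1) <;>
        by_cases hm : pvPre a (k + 1) < pvMinU a (k + 1) <;>
        simp only [hc, hm, if_true, if_false, reduceIte, Prod.mk.injEq] <;>
        refine ⟨?_, ?_, ?_, ?_, ?_, ?_⟩ <;>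
        (try split_ifs) <;>
        first | rfl | omega | (push_cast; ring) | (push_cast; omega) | simp
    · have hczv : pvCZ a (k + 1) = pvCZ a k := by rw [hcz]; simp [hz]
      have hdiff : (k : Int) - pvCZ a k + 1 - pvCZ a k = pvPre a (k + 1) := by
        rw [hP1, hczv]; push_cast; ring
      simp only [redGreenStepA, hget, hz, reduceIte, hdiff, hB, hM2, hA2]
      by_cases hc : (pvBest a k).1 < pvPre a (k + 1) - pvMinU a (k + 1) <;>
        by_cases hm : pvPre a (k + 1) < pvMinU a (k + 1) <;>
        simp only [hc, hm, if_true, if_false, reduceIte, Prod.mk.injEq] <;>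
        refine ⟨?_, ?_, ?_, ?_, ?_, ?_⟩ <;>
        (try split_ifs) <;>
        first | rfl | omega | (push_cast; ring) | (push_cast; omega) | simp

lemma pvBState (a : List Int) (k : ℕ) (hk : k ≤ a.length) :
    (List.range k).foldl
      (fun st r => (List.range (r + 1)).foldl (redGreenStepB a r) st)
      ((0 : Int), [(-1 : Int), 0]) = pvBest a k := by
  induction k with
  | zero => simp [pvBest]
  | succ k ih =>
    have hk' : k < a.length := hk
    rw [List.range_succ, List.foldl_append, ih (le_of_lt hk')]
    have h := pvInner a k (pvBest a k).1 (pvBest a k).2 (k + 1) (by omega) le_rfl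
    have hB : pvBest a (k + 1) =
        if (pvBest a k).1 < pvPre a (k + 1) - pvMinU a (k + 1)
        then (pvPre a (k + 1) - pvMinU a (k + 1), [((pvArgU a (k + 1) : ℕ) : Int), (k : Int)])
        else pvBest a k := rfl
    rw [Prod.mk.eta] at h
    simp only [List.foldl_cons, List.foldl_nil]
    rw [h, ← hB]

-- ===== VERDICT (by name: the statement is the Claim_ definition above) =====
theorem red_green_spec : Claim_equal_red_green := by
  intro a _
  unfold Spec_red_green red_green red_green_alt
  rw [pvAState a a.length le_rfl, pvBState a a.length le_rfl]
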